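-- pv_equiv track=rewrite | github.com/bio-ontology-research-group/hapli | hapli/gff_alignment.py | _parse_walk
-- ===== SOURCE A (Python) =====
-- from typing import Dict, List, Tuple, Optional, Set, NamedTuple, Union
--
-- def _parse_walk(walk: str) -> List[str]:
--     """Parse a walk string to extract segment IDs with orientations."""
--     segments = []
--
--     # Handle different walk formats
--     if ',' in walk:
--         # Format like: 1+,2-,3+
--         for seg in walk.split(','):
--             seg = seg.strip()
--             if seg:
--                 segments.append(seg)
--     else:
--         # Format like: >1<2>3 or other formats
--         i = 0
--         current_seg = ""
--         orientation = "+"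
--
--         while i < len(walk):
--             char = walk[i]
--             if char == '>' or char == '<':
--                 if current_seg:
--                     # Add previous segment
--                     segments.append(current_seg + orientation)
--                     current_seg = ""
--                 orientation = "+" if char == '>' else "-"
--             elif char.isdigit() or char.isalpha() or char == '_':
--                 current_seg += char
--             elif char in [' ', '\t']:
--                 if current_seg:
--                     segments.append(current_seg + orientation)
--                     current_seg = ""
--                     orientation = "+"
--             i += 1
--
--         # Add final segment
--         if current_seg:
--             segments.append(current_seg + orientation)
--
--     return segments
-- ===== SOURCE B (Python) =====
-- from typing import List
--
--
-- def _word(c: str) -> bool: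
--     return c.isdigit() or c.isalpha() or c == '_'
--
--
-- def _tokens(walk: str) -> List[str]:
--     """Split into segment pieces and single-character separators (<, >, space, tab)."""
--     toks = []
--     cur = ''
--     for ch in walk:
--         if ch in '<> \t':
--             if cur:
--                 toks.append(cur)
--             toks.append(ch)
--             cur = ''
--         else:
--             cur += ch
--     if cur:
--         toks.append(cur)
--     return toks
--
--
-- def _parse_walk(walk: str) -> List[str]:
--     """Parse a walk string to extract segment IDs with orientations."""
--     if ',' in walk:
--         # Format like: 1+,2-,3+
--         return [t for t in (p.strip() for p in walk.split(',')) if t]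
--
--     # Format like: >1<2>3. A marker orients the segment that follows it;
--     # a segment with no marker of its own is forward.
--     segments = []
--     orient = '+'
--     for tok in _tokens(walk):
--         if tok == '>':
--             orient = '+'
--         elif tok == '<':
--             orient = '-'
--         else:
--             name = ''.join(c for c in tok if _word(c))
--             if name:
--                 segments.append(name + orient)
--                 orient = '+'
--     return segments
-- ===== Notes on version B (the rewrite author's own statement) =====
-- stated objective: faster
-- what changed: The non-comma branch's per-character flush state machine is replaced by a two-phase design: tokenize the walk into pieces and single-character separators, then one token loop where a marker sets the orientation of the following segment and orientation defaults back to forward after each emitted segment; the comma branch becomes a strip/filter comprehension.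
import Mathlib
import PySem

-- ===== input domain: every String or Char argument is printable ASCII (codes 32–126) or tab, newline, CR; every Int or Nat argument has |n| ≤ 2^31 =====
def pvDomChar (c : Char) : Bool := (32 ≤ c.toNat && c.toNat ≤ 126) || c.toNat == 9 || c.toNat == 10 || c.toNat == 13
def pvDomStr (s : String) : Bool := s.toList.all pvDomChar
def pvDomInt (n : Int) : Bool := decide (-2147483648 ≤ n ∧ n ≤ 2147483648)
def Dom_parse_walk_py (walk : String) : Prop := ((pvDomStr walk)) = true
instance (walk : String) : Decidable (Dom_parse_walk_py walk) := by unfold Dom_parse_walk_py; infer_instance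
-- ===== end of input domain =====

-- B replaces A's per-character state machine by a tokenizer plus a single token loop
-- ("a marker orients the following segment, default forward"); objective: alternative decomposition.

-- ===== PORT A =====
-- A's while loop over the characters with state (segments, current_seg, orientation).
def pvAStep (st : List String × List Char × Char) (char : Char) :
    List String × List Char × Char :=
  let (segs, cur, ori) := st
  if char = '>' ∨ char = '<' then
    let segs := if cur ≠ [] then segs ++ [String.ofList (cur ++ [ori])] else segs
    (segs, [], if char = '>' then '+' else '-')
  else if PySem.Chars.isdigit char || PySem.Chars.isalpha char || char = '_' then
    (segs, cur ++ [char], ori)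
  else if char = ' ' ∨ char = '\t' then
    if cur ≠ [] then (segs ++ [String.ofList (cur ++ [ori])], [], '+')
    else (segs, cur, ori)
  else (segs, cur, ori)

def parse_walk_py (walk : String) : List String :=
  if PySem.Str.isIn "," walk = true then
    ((PySem.Str.split? walk ",").getD []).foldl (fun segs seg =>
      let seg := PySem.Str.strip seg
      if seg ≠ "" then segs ++ [seg] else segs) []
  else
    let fin := walk.toList.foldl pvAStep ([], [], '+')
    let (segs, cur, ori) := fin
    if cur ≠ [] then segs ++ [String.ofList (cur ++ [ori])] else segs

-- ===== PORT B =====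
def pvWord (c : Char) : Bool :=
  PySem.Chars.isdigit c || PySem.Chars.isalpha c || c = '_'

-- Source B's _tokens loop: pieces and single-character separators.
def pvTokStep (st : List (List Char) × List Char) (ch : Char) :
    List (List Char) × List Char :=
  let (toks, cur) := st
  if ch = '<' ∨ ch = '>' ∨ ch = ' ' ∨ ch = '\t' then
    ((if cur ≠ [] then toks ++ [cur] else toks) ++ [[ch]], [])
  else (toks, cur ++ [ch])

def pvTokens (walk : List Char) : List (List Char) :=
  let (toks, cur) := walk.foldl pvTokStep ([], [])
  if cur ≠ [] then toks ++ [cur] else toks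

-- Source B's token loop with state (segments, orient).
def pvBStep (st : List String × Char) (tok : List Char) : List String × Char :=
  if tok = ['>'] then (st.1, '+')
  else if tok = ['<'] then (st.1, '-')
  else
    let name := tok.filter pvWord
    if name ≠ [] then (st.1 ++ [String.ofList (name ++ [st.2])], '+') else st

def parse_walk_py_alt (walk : String) : List String :=
  if PySem.Str.isIn "," walk = true then
    (((PySem.Str.split? walk ",").getD []).map PySem.Str.strip).filter (· ≠ "")
  else
    ((pvTokens walk.toList).foldl pvBStep ([], '+')).1

-- ===== PRECONDITION & SPEC =====
def Spec_parse_walk_py (walk : String) (out : List String) : Prop := out = parse_walk_py_alt walk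
instance (walk : String) (out : List String) : Decidable (Spec_parse_walk_py walk out) := by unfold Spec_parse_walk_py; infer_instance

-- ===== CLAIM (what is proved, stated in full; the proofs are below) =====
def Claim_equal_parse_walk_py : Prop := ∀ (walk : String), Dom_parse_walk_py walk → Spec_parse_walk_py walk (parse_walk_py walk)

-- ===== LEMMAS AND PROOFS =====

-- the tokens accumulator of Source B's tokenizer fold factors out to the left
lemma pvTokStep_factor (chars : List Char) (toks : List (List Char)) (piece : List Char) :
    chars.foldl pvTokStep (toks, piece) =
      (toks ++ (chars.foldl pvTokStep ([], piece)).1,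
       (chars.foldl pvTokStep ([], piece)).2) := by
  induction chars generalizing toks piece with
  | nil => simp
  | cons c cs ih =>
    simp only [List.foldl_cons]
    by_cases h : c = '<' ∨ c = '>' ∨ c = ' ' ∨ c = '\t'
    · rw [show pvTokStep (toks, piece) c =
          ((if piece ≠ [] then toks ++ [piece] else toks) ++ [[c]], []) by
        simp [pvTokStep, h],
        show pvTokStep ([], piece) c =
          ((if piece ≠ [] then [piece] else []) ++ [[c]], []) by simp [pvTokStep, h],
        ih ((if piece ≠ [] then toks ++ [piece] else toks) ++ [[c]]) [],
        ih ((if piece ≠ [] then [piece] else []) ++ [[c]]) []]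
      by_cases hp : piece ≠ [] <;> simp [hp]
    · rw [show pvTokStep (toks, piece) c = (toks, piece ++ [c]) by simp [pvTokStep, h],
        show pvTokStep ([], piece) c = ([], piece ++ [c]) by simp [pvTokStep, h]]
      exact ih toks (piece ++ [c])

-- tokenization from a partial piece
def pvTokFrom (chars : List Char) (piece : List Char) : List (List Char) :=
  let (toks, cur) := chars.foldl pvTokStep ([], piece)
  if cur ≠ [] then toks ++ [cur] else toks

lemma pvTokFrom_sep (c : Char) (cs : List Char) (piece : List Char)
    (h : c = '<' ∨ c = '>' ∨ c = ' ' ∨ c = '\t') :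
    pvTokFrom (c :: cs) piece =
      (if piece ≠ [] then [piece] else []) ++ [c] :: pvTokFrom cs [] := by
  simp only [pvTokFrom, List.foldl_cons,
    show pvTokStep ([], piece) c =
      ((if piece ≠ [] then [piece] else []) ++ [[c]], []) by simp [pvTokStep, h],
    pvTokStep_factor cs ((if piece ≠ [] then [piece] else []) ++ [[c]]) []]
  by_cases hp : piece ≠ [] <;>
    by_cases hc : (cs.foldl pvTokStep ([], [])).2 ≠ [] <;> simp [hp, hc]

lemma pvTokFrom_nonsep (c : Char) (cs : List Char) (piece : List Char)
    (h : ¬ (c = '<' ∨ c = '>' ∨ c = ' ' ∨ c = '\t')) :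
    pvTokFrom (c :: cs) piece = pvTokFrom cs (piece ++ [c]) := by
  simp only [pvTokFrom, List.foldl_cons,
    show pvTokStep ([], piece) c = ([], piece ++ [c]) by simp [pvTokStep, h]]

-- processing an optional leading piece token in B's loop
lemma pvBStep_piece (piece : List Char) (segs : List String) (ori : Char)
    (hp : '<' ∉ piece ∧ '>' ∉ piece) :
    ((if piece ≠ [] then [piece] else []).foldl pvBStep (segs, ori)) =
      (if piece.filter pvWord ≠ [] then
        (segs ++ [String.ofList (piece.filter pvWord ++ [ori])], '+') else (segs, ori)) := by
  by_cases h : piece ≠ []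
  · have h1 : ¬ (piece = ['>']) := by rintro rfl; exact hp.2 (by simp)
    have h2 : ¬ (piece = ['<']) := by rintro rfl; exact hp.1 (by simp)
    simp only [if_pos h, List.foldl_cons, List.foldl_nil, pvBStep, if_neg h1, if_neg h2]
  · have : piece = [] := by tauto
    subst this
    simp

-- main invariant: A's finalized state machine equals B's token loop
lemma pvMain (chars : List Char) (piece : List Char) (segs : List String) (ori : Char)
    (hp : '<' ∉ piece ∧ '>' ∉ piece) :
    (let fin := chars.foldl pvAStep (segs, piece.filter pvWord, ori)
     let (segs', cur', ori') := fin
     if cur' ≠ [] then segs' ++ [String.ofList (cur' ++ [ori'])] else segs') =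
      ((pvTokFrom chars piece).foldl pvBStep (segs, ori)).1 := by
  induction chars generalizing piece segs ori with
  | nil =>
    simp only [pvTokFrom, List.foldl_nil, List.nil_append]
    rw [pvBStep_piece piece segs ori hp]
    by_cases hf : piece.filter pvWord ≠ [] <;> simp [hf]
  | cons c cs ih =>
    by_cases hgt : c = '>'
    · subst hgt
      rw [pvTokFrom_sep _ _ _ (by simp), List.foldl_append,
        pvBStep_piece piece segs ori hp]
      have hfst : (if piece.filter pvWord ≠ [] then
          (segs ++ [String.ofList (piece.filter pvWord ++ [ori])], '+') else (segs, ori)).1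
          = (if piece.filter pvWord ≠ [] then
            segs ++ [String.ofList (piece.filter pvWord ++ [ori])] else segs) := by
        by_cases hf : piece.filter pvWord ≠ [] <;> simp [hf]
      simp only [List.foldl_cons,
        show ∀ st : List String × Char, pvBStep st ['>'] = (st.1, '+') from
          fun st => by simp [pvBStep],
        hfst,
        show pvAStep (segs, piece.filter pvWord, ori) '>' =
          ((if piece.filter pvWord ≠ [] then
              segs ++ [String.ofList (piece.filter pvWord ++ [ori])] else segs), [], '+') by
          simp [pvAStep]]
      have := ih [] (if piece.filter pvWord ≠ [] then
        segs ++ [String.ofList (piece.filter pvWord ++ [ori])] else segs) '+' (by simp)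
      simpa using this
    · by_cases hlt : c = '<'
      · subst hlt
        rw [pvTokFrom_sep _ _ _ (by simp), List.foldl_append,
          pvBStep_piece piece segs ori hp]
        have hfst : (if piece.filter pvWord ≠ [] then
            (segs ++ [String.ofList (piece.filter pvWord ++ [ori])], '+') else (segs, ori)).1
            = (if piece.filter pvWord ≠ [] then
              segs ++ [String.ofList (piece.filter pvWord ++ [ori])] else segs) := by
          by_cases hf : piece.filter pvWord ≠ [] <;> simp [hf]
        simp only [List.foldl_cons,
          show ∀ st : List String × Char, pvBStep st ['<'] = (st.1, '-') from
            fun st => by simp [pvBStep],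
          hfst,
          show pvAStep (segs, piece.filter pvWord, ori) '<' =
            ((if piece.filter pvWord ≠ [] then
                segs ++ [String.ofList (piece.filter pvWord ++ [ori])] else segs), [], '-') by
            simp [pvAStep]]
        have := ih [] (if piece.filter pvWord ≠ [] then
          segs ++ [String.ofList (piece.filter pvWord ++ [ori])] else segs) '-' (by simp)
        simpa using this
      · by_cases hsp : c = ' ' ∨ c = '\t'
        · rw [pvTokFrom_sep _ _ _ (by tauto), List.foldl_append,
            pvBStep_piece piece segs ori hp]
          have hnw : pvWord c = false := by
            rcases hsp with h | h <;> subst h <;> decide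
          have hstep : pvAStep (segs, piece.filter pvWord, ori) c =
              (if piece.filter pvWord ≠ [] then
                 (segs ++ [String.ofList (piece.filter pvWord ++ [ori])], [], '+')
               else (segs, piece.filter pvWord, ori)) := by
            rcases hsp with h | h <;> subst h <;> simp [pvAStep, pvWord] at hnw ⊢ <;>
              simp [hnw.1, hnw.2]
          have hd1 : pvWord ' ' = false := by decide
          have hd2 : pvWord '\t' = false := by decide
          have hbs : ∀ st : List String × Char, pvBStep st [c] = st := by
            intro st
            rcases hsp with h | h <;> subst h <;>
              simp [pvBStep, List.filter, hd1, hd2]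
          simp only [List.foldl_cons, hstep, hbs]
          by_cases hf : piece.filter pvWord ≠ []
          · simp only [if_pos hf]
            have := ih [] (segs ++ [String.ofList (piece.filter pvWord ++ [ori])]) '+' (by simp)
            simpa using this
          · simp only [if_neg hf]
            have hpe : piece.filter pvWord = [] := by tauto
            have := ih [] segs ori (by simp)
            simp only [hpe] at *
            simpa using this
        · rw [pvTokFrom_nonsep _ _ _ (by tauto)]
          have hp' : '<' ∉ piece ++ [c] ∧ '>' ∉ piece ++ [c] := by
            constructor <;> intro hmem <;> rcases List.mem_append.1 hmem with hm | hm
            · exact hp.1 hm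
            · exact hlt (List.mem_singleton.1 hm).symm
            · exact hp.2 hm
            · exact hgt (List.mem_singleton.1 hm).symm
          by_cases hw : pvWord c = true
          · have hf : (piece ++ [c]).filter pvWord = piece.filter pvWord ++ [c] := by
              simp [List.filter_append, hw]
            have step : pvAStep (segs, piece.filter pvWord, ori) c =
                (segs, (piece ++ [c]).filter pvWord, ori) := by
              simp only [pvAStep, pvWord] at hw ⊢
              rw [if_neg (by tauto), if_pos hw, hf]
            simp only [List.foldl_cons, step]
            exact ih (piece ++ [c]) segs ori hp'
          · have hf : (piece ++ [c]).filter pvWord = piece.filter pvWord := by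
              simp [List.filter_append, Bool.eq_false_iff.mpr (by simpa using hw)]
            have step : pvAStep (segs, piece.filter pvWord, ori) c =
                (segs, (piece ++ [c]).filter pvWord, ori) := by
              simp only [pvAStep, pvWord] at hw ⊢
              rw [if_neg (by tauto), if_neg (by simpa using hw), if_neg (by tauto), hf]
            simp only [List.foldl_cons, step]
            exact ih (piece ++ [c]) segs ori hp'

-- A's comma-branch filter loop equals B's map-then-filter comprehension
lemma pvComma (l : List String) (acc : List String) :
    l.foldl (fun segs seg =>
      if PySem.Str.strip seg ≠ "" then segs ++ [PySem.Str.strip seg] else segs) acc =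
      acc ++ (l.map PySem.Str.strip).filter (· ≠ "") := by
  induction l generalizing acc with
  | nil => simp
  | cons x xs ih =>
    simp only [List.foldl_cons, List.map_cons, List.filter_cons, ih]
    by_cases h : PySem.Str.strip x ≠ "" <;> simp [h]

-- ===== VERDICT (by name: the statement is the Claim_ definition above) =====
theorem parse_walk_py_spec : Claim_equal_parse_walk_py := by
  intro walk _
  unfold Spec_parse_walk_py parse_walk_py parse_walk_py_alt
  by_cases h : PySem.Str.isIn "," walk = true
  · simp only [h, if_true]
    simpa using pvComma ((PySem.Str.split? walk ",").getD []) []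
  · simp only [h]
    have := pvMain walk.toList [] [] '+' (by simp)
    simpa [pvTokens, pvTokFrom] using this
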